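-- pv_equiv track=rewrite | github.com/sallfatima/step3 | modules/removal_export_pipeline/utils/export_utils.py | replace_in_positions
-- ===== SOURCE A (Python) =====
-- from typing import List, Optional, Tuple
--
-- def replace_in_positions(
--     text: str, target_char: str, replacement_char: str, positions: Tuple
-- ) -> str:
--     """Replaces any index occurrence found in positions of 'target_char' in 'text', with 'replacement_char'"""
--     count = 0
--     new_string = ""
--     for char in text:
--         if char == target_char:
--             count += 1
--             if count in list(positions):
--                 new_string += replacement_char
--             else:
--                 new_string += char
--         else:
--             new_string += char
--     return new_string
-- ===== SOURCE B (Python) =====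
-- def replace_in_positions(text, target_char, replacement_char, positions):
--     occ = [i for i, ch in enumerate(text) if ch == target_char]
--     n = len(occ)
--     to_replace = {occ[p - 1] for p in positions if 1 <= p <= n}
--     return "".join(
--         replacement_char if i in to_replace else ch for i, ch in enumerate(text)
--     )
-- ===== Notes on version B (the rewrite author's own statement) =====
-- stated objective: alternative
-- what changed: Instead of streaming through the text with a running occurrence counter and scanning the positions list at every match, B precomputes the list of occurrence indices, resolves the requested 1-based occurrence numbers into a set of character indices once, and then emits the output in a single indexed pass testing set membership.
import Mathlib
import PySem

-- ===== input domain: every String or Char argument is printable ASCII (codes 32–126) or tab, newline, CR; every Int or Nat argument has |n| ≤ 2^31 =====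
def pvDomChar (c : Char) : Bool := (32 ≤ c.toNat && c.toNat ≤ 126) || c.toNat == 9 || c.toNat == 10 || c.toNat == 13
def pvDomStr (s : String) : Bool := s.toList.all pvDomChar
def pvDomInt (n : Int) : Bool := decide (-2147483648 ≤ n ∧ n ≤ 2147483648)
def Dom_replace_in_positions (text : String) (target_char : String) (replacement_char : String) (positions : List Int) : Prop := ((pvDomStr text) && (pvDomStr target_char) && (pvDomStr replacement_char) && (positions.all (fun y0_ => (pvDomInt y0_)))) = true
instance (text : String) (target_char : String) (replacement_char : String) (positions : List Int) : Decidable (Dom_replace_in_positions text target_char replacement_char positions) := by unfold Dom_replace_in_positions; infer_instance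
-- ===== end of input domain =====

-- B precomputes the occurrence indices and the set of indices to replace, then emits the
-- output in one indexed pass testing set membership, instead of A's per-match scan of positions.

-- ===== PORT A =====
def replace_in_positions (text : String) (target_char : String) (replacement_char : String) (positions : List Int) : String :=
  String.mk
    ((text.toList.foldl
      (fun (st : Int × List Char) char =>
        if [char] == target_char.toList then
          let count := st.1 + 1
          if positions.contains count then (count, st.2 ++ replacement_char.toList)
          else (count, st.2 ++ [char])
        else (st.1, st.2 ++ [char]))
      ((0 : Int), ([] : List Char))).2)

-- ===== PORT B =====
-- ''.join over the generator is ported as char-level flatMap (joining with the empty separator is concatenation)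
def replace_in_positions_alt (text : String) (target_char : String) (replacement_char : String) (positions : List Int) : String :=
  let occ : List Int :=
    ((PySem.List.enumerate text.toList).filter (fun ic => [ic.2] == target_char.toList)).map (fun ic => ic.1)
  let toReplace : PySem.Set Int :=
    PySem.Set.ofList
      ((positions.filter (fun p => decide (1 ≤ p ∧ p ≤ (occ.length : Int)))).map
        (fun p => PySem.List.pyGetD occ (p - 1) 0))
  String.mk
    ((PySem.List.enumerate text.toList).flatMap
      (fun ic => if PySem.Set.contains toReplace ic.1 then replacement_char.toList else [ic.2]))

-- ===== PRECONDITION & SPEC =====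
def Spec_replace_in_positions (text : String) (target_char : String) (replacement_char : String) (positions : List Int) (out : String) : Prop := out = replace_in_positions_alt text target_char replacement_char positions
instance (text : String) (target_char : String) (replacement_char : String) (positions : List Int) (out : String) : Decidable (Spec_replace_in_positions text target_char replacement_char positions out) := by unfold Spec_replace_in_positions; infer_instance

-- ===== CLAIM (what is proved, stated in full; the proofs are below) =====
def Claim_equal_replace_in_positions : Prop := ∀ (text : String) (target_char : String) (replacement_char : String) (positions : List Int), Dom_replace_in_positions text target_char replacement_char positions → Spec_replace_in_positions text target_char replacement_char positions (replace_in_positions text target_char replacement_char positions)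

-- ===== LEMMAS AND PROOFS =====

-- Common recursive shape both ports are reduced to: walk the text with a match counter.
def pvAux (t r : List Char) (P : List Int) : List Char → Int → List Char
  | [], _ => []
  | c :: cs, k =>
    if [c] == t then
      (if P.contains (k + 1) then r else [c]) ++ pvAux t r P cs (k + 1)
    else c :: pvAux t r P cs k

-- The occurrence-index list B builds, parameterised by the enumerate start.
def pvOcc (t : List Char) (cs : List Char) (s : Int) : List Int :=
  ((PySem.List.enumerate cs s).filter (fun ic => [ic.2] == t)).map (fun ic => ic.1)

theorem pvOcc_cons (t : List Char) (c : Char) (cs : List Char) (s : Int) :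
    pvOcc t (c :: cs) s = (if [c] == t then [s] else []) ++ pvOcc t cs (s + 1) := by
  simp only [pvOcc, PySem.List.enumerate_cons, List.filter_cons]
  split <;> simp

theorem pvOcc_append (t : List Char) (xs ys : List Char) (s : Int) :
    pvOcc t (xs ++ ys) s = pvOcc t xs s ++ pvOcc t ys (s + xs.length) := by
  simp [pvOcc, PySem.List.enumerate_append]

theorem pvOcc_length (t : List Char) (cs : List Char) (s : Int) :
    (pvOcc t cs s).length = cs.countP (fun c => [c] == t) := by
  induction cs generalizing s with
  | nil => simp [pvOcc]
  | cons c cs ih =>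
    rw [pvOcc_cons]
    by_cases h : [c] == t <;> simp [h, ih]

theorem pvOcc_mem (t : List Char) (cs : List Char) (s : Int) (x : Int) :
    x ∈ pvOcc t cs s ↔ ∃ (j : Nat) (h : j < cs.length), x = s + j ∧ ([cs[j]] == t) = true := by
  simp only [pvOcc, List.mem_map, List.mem_filter]
  constructor
  · rintro ⟨⟨i, c⟩, ⟨hmem, hm⟩, rfl⟩
    rw [PySem.List.mem_enumerate_iff] at hmem
    obtain ⟨j, hj, hp⟩ := hmem
    exact ⟨j, hj, by simp_all⟩
  · rintro ⟨j, hj, rfl, hm⟩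
    exact ⟨(s + j, cs[j]), ⟨by rw [PySem.List.mem_enumerate_iff]; exact ⟨j, hj, rfl⟩, hm⟩, rfl⟩

theorem pvOcc_pairwise (t : List Char) (cs : List Char) (s : Int) :
    (pvOcc t cs s).Pairwise (· < ·) := by
  have h := PySem.List.pairwise_lt_enumerate cs s
  exact (h.filter _).map _ (fun a b hab => hab)

theorem pvOcc_nodup (t : List Char) (cs : List Char) (s : Int) :
    (pvOcc t cs s).Nodup :=
  (pvOcc_pairwise t cs s).imp (fun h => ne_of_lt h)

-- A's foldl equals pvAux (with the running count as invariant).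
theorem foldlA_eq_pvAux (t r : List Char) (P : List Int) (cs : List Char) (k : Int) (acc : List Char) :
    (cs.foldl
      (fun (st : Int × List Char) char =>
        if [char] == t then
          let count := st.1 + 1
          if P.contains count then (count, st.2 ++ r)
          else (count, st.2 ++ [char])
        else (st.1, st.2 ++ [char]))
      (k, acc)) = (k + (cs.countP (fun c => [c] == t) : Int), acc ++ pvAux t r P cs k) := by
  induction cs generalizing k acc with
  | nil => simp [pvAux]
  | cons c cs ih =>
    by_cases hm : ([c] == t) = true
    · by_cases hc : P.contains (k + 1) = true
      · have hc2 : k + 1 ∈ P := by simpa using hc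
        simp only [List.foldl_cons, hm, hc, reduceIte]
        rw [ih]
        simp [pvAux, hm, hc2, Prod.ext_iff, List.append_assoc]
        omega
      · have hc2 : k + 1 ∉ P := by simpa using hc
        simp only [List.foldl_cons, hm, hc, Bool.false_eq_true, reduceIte]
        rw [ih]
        simp [pvAux, hm, hc2, Prod.ext_iff, List.append_assoc]
        omega
    · simp only [List.foldl_cons, hm, Bool.false_eq_true, reduceIte]
      rw [ih]
      simp [pvAux, hm]


theorem pvOcc_getElem_rank (t : List Char) (pre : List Char) (c : Char) (suf : List Char)
    (hm : ([c] == t) = true) :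
    (pvOcc t (pre ++ c :: suf) 0)[pre.countP (fun c => [c] == t)]? = some ((pre.length : Int)) := by
  rw [pvOcc_append, List.getElem?_append_right (by rw [pvOcc_length])]
  rw [pvOcc_length, Nat.sub_self, pvOcc_cons]
  simp [hm]

theorem pvOcc_not_mem (t : List Char) (pre : List Char) (c : Char) (suf : List Char)
    (hm : ([c] == t) = false) :
    ((pre.length : Int)) ∉ pvOcc t (pre ++ c :: suf) 0 := by
  intro h
  rw [pvOcc_mem] at h
  obtain ⟨j, hj, hij, hmj⟩ := h
  have hj' : j = pre.length := by omega
  subst hj'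
  rw [List.getElem_append_right (Nat.le_refl _)] at hmj
  simp at hmj
  simp [hmj] at hm

-- The set B builds contains a match index iff its 1-based rank occurs in positions …
theorem contains_toReplace_iff (t : List Char) (cs : List Char) (P : List Int) (j : Nat) (i : Int)
    (hj : (pvOcc t cs 0)[j]? = some i) :
    PySem.Set.contains
      (PySem.Set.ofList
        ((P.filter (fun p => decide (1 ≤ p ∧ p ≤ ((pvOcc t cs 0).length : Int)))).map
          (fun p => PySem.List.pyGetD (pvOcc t cs 0) (p - 1) 0))) i = true ↔ ((j : Int) + 1) ∈ P := by
  obtain ⟨hjlt, hji⟩ := List.getElem?_eq_some_iff.mp hj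
  rw [PySem.Set.contains_iff, PySem.Set.mem_ofList]
  constructor
  · rintro hmem
    rw [List.mem_map] at hmem
    obtain ⟨p, hp, hpi⟩ := hmem
    rw [List.mem_filter] at hp
    obtain ⟨hpP, hrange⟩ := hp
    have hr : 1 ≤ p ∧ p ≤ ((pvOcc t cs 0).length : Int) := by simpa using hrange
    have h1 : (0 : Int) ≤ p - 1 := by omega
    have h2 : p - 1 < ((pvOcc t cs 0).length : Int) := by omega
    rw [PySem.List.pyGetD_eq_getElem _ _ h1 h2] at hpi
    have hlt : (p - 1).toNat < (pvOcc t cs 0).length := by omega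
    have hnd := pvOcc_nodup t cs 0
    have heq : (p - 1).toNat = j :=
      (List.Nodup.getElem_inj_iff hnd (hi := hlt) (hj := hjlt)).mp (by rw [hpi, hji])
    have : p = (j : Int) + 1 := by omega
    subst this
    exact hpP
  · intro hP
    rw [List.mem_map]
    refine ⟨(j : Int) + 1, ?_, ?_⟩
    · rw [List.mem_filter]
      exact ⟨hP, by simp; omega⟩
    · have : ((j : Int) + 1 - 1) = (j : Int) := by omega
      rw [this, PySem.List.pyGetD_natCast]
      simp [List.getD, hj]

-- … and contains nothing that is not a match index.
theorem contains_toReplace_false (t : List Char) (cs : List Char) (P : List Int) (i : Int)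
    (hi : i ∉ pvOcc t cs 0) :
    PySem.Set.contains
      (PySem.Set.ofList
        ((P.filter (fun p => decide (1 ≤ p ∧ p ≤ ((pvOcc t cs 0).length : Int)))).map
          (fun p => PySem.List.pyGetD (pvOcc t cs 0) (p - 1) 0))) i = false := by
  rw [Bool.eq_false_iff]
  intro hc
  rw [PySem.Set.contains_iff, PySem.Set.mem_ofList, List.mem_map] at hc
  obtain ⟨p, hp, hpi⟩ := hc
  rw [List.mem_filter] at hp
  have hr : 1 ≤ p ∧ p ≤ ((pvOcc t cs 0).length : Int) := by simpa using hp.2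
  apply hi
  rw [← hpi]
  apply PySem.List.pyGetD_mem
  simp [PySem.Raise.InRange]
  omega

-- B's single indexed pass equals pvAux, with the prefix length / match count as invariant.
theorem flatMap_eq_pvAux (t r : List Char) (P : List Int) (cs : List Char) (S : List Int)
    (hS : ∀ (j : Nat) (i : Int), (pvOcc t cs 0)[j]? = some i →
      (PySem.Set.contains S i = true ↔ ((j : Int) + 1) ∈ P))
    (hS' : ∀ i : Int, i ∉ pvOcc t cs 0 → PySem.Set.contains S i = false) :
    ∀ (suf pre : List Char), cs = pre ++ suf →
    (PySem.List.enumerate suf ((pre.length : Int))).flatMap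
        (fun ic => if PySem.Set.contains S ic.1 then r else [ic.2])
      = pvAux t r P suf ((pre.countP (fun c => [c] == t) : Int)) := by
  intro suf
  induction suf with
  | nil => intro pre h; simp [pvAux]
  | cons c suf ih =>
    intro pre hcs
    rw [PySem.List.enumerate_cons, List.flatMap_cons]
    have hpre' : cs = (pre ++ [c]) ++ suf := by simp [hcs]
    have hlen : (((pre ++ [c]).length : Nat) : Int) = (pre.length : Int) + 1 := by simp
    by_cases hm : ([c] == t) = true
    · have hrank := pvOcc_getElem_rank t pre c suf hm
      rw [← hcs] at hrank
      have hcont := hS _ _ hrank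
      have hcount' : ((pre ++ [c]).countP (fun c => [c] == t) : Int)
          = (pre.countP (fun c => [c] == t) : Int) + 1 := by
        simp [List.countP_append, hm]
      have hrec := ih (pre ++ [c]) hpre'
      rw [hlen, hcount'] at hrec
      rw [hrec]
      show (if PySem.Set.contains S (pre.length : Int) then r else [c]) ++ _ = _
      by_cases hP : ((pre.countP (fun c => [c] == t) : Int) + 1) ∈ P
      · have hmemS : ((pre.length : Int)) ∈ S :=
          (PySem.Set.contains_iff S _).mp (hcont.mpr hP)
        simp [pvAux, hm, hmemS, hP]
      · have hmemS : ((pre.length : Int)) ∉ S := by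
          intro hmem
          exact hP (hcont.mp ((PySem.Set.contains_iff S _).mpr hmem))
        simp [pvAux, hm, hmemS, hP]
    · have hnm : ([c] == t) = false := by simpa using hm
      have hnotmem := pvOcc_not_mem t pre c suf hnm
      rw [← hcs] at hnotmem
      have hfalse := hS' _ hnotmem
      have hcount' : ((pre ++ [c]).countP (fun c => [c] == t) : Int)
          = (pre.countP (fun c => [c] == t) : Int) := by
        simp [List.countP_append, hnm]
      have hrec := ih (pre ++ [c]) hpre'
      rw [hlen, hcount'] at hrec
      rw [hrec]
      have hmemS : ((pre.length : Int)) ∉ S := by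
        intro hmem
        rw [(PySem.Set.contains_iff S _).mpr hmem] at hfalse
        exact Bool.noConfusion hfalse
      simp [pvAux, hnm, hmemS]

-- ===== VERDICT (by name: the statement is the Claim_ definition above) =====
theorem altB_unfold (text target_char replacement_char : String) (P : List Int) :
    replace_in_positions_alt text target_char replacement_char P =
    String.mk ((PySem.List.enumerate text.toList).flatMap
      (fun ic => if PySem.Set.contains
          (PySem.Set.ofList
            ((P.filter (fun p => decide (1 ≤ p ∧ p ≤ ((pvOcc target_char.toList text.toList 0).length : Int)))).map
              (fun p => PySem.List.pyGetD (pvOcc target_char.toList text.toList 0) (p - 1) 0))) ic.1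
        then replacement_char.toList else [ic.2])) := rfl

theorem replace_in_positions_spec : Claim_equal_replace_in_positions := by
  intro text target_char replacement_char positions _
  unfold Spec_replace_in_positions
  rw [altB_unfold]
  have hmain := flatMap_eq_pvAux target_char.toList replacement_char.toList positions text.toList _
      (fun j i hj => contains_toReplace_iff target_char.toList text.toList positions j i hj)
      (fun i hi => contains_toReplace_false target_char.toList text.toList positions i hi)
      text.toList [] (by simp)
  simp only [List.length_nil, Nat.cast_zero, List.countP_nil] at hmain
  rw [hmain]
  unfold replace_in_positions
  rw [foldlA_eq_pvAux]
  simp
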